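-- pv_equiv track=rewrite | github.com/Jonah987654321/StraightSudokuSolver | main.py | checkColumnsPossible
-- ===== SOURCE A (Python) =====
-- def checkColumnsPossible(data):
--     for x in range(0, len(data[0])):
--         found = []
--         for y in range(0, len(data)):
--             if data[y][x] in found and data[y][x] is not None:
--                 return False
--             found.append(data[y][x])
--     return True
-- ===== SOURCE B (Python) =====
-- def checkColumnsPossible(data):
--     for x in range(len(data[0])):
--         vals = [row[x] for row in data if row[x] is not None]
--         if len(vals) != len(set(vals)):
--             return False
--     return True
-- ===== Notes on version B (the rewrite author's own statement) =====
-- stated objective: simpler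
-- what changed: Replaces the incremental found-list with quadratic membership scans per column by materialising each column's non-None values once and comparing len(vals) to len(set(vals)).
-- outside the precondition, e.g. on checkColumnsPossible([[49, None], [49, None], []]): A returns False, B raises IndexError
import Mathlib
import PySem

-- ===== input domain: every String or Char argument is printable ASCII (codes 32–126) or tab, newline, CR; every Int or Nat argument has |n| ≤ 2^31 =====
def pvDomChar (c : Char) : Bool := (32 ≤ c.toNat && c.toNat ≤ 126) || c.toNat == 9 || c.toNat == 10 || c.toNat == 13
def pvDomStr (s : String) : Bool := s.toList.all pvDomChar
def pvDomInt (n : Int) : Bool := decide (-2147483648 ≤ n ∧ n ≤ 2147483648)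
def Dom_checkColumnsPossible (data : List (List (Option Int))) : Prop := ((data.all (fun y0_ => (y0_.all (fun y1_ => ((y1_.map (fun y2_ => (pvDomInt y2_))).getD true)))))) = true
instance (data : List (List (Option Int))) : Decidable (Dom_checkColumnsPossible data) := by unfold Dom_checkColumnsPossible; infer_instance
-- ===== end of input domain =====

-- B replaces A's per-column incremental found-list with quadratic membership scans by
-- materialising each column's non-None values once and comparing len(vals) with len(set(vals)) (objective: simpler).

-- ===== PORT A =====
-- inner loop 'for y in range(0, len(data))' with the found accumulator; false = the Python 'return False'
def pvA_colLoop (data : List (List (Option Int))) (x : Int) : List Int → List (Option Int) → Bool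
  | [], _ => true
  | y :: ys, found =>
    let v := PySem.List.pyGetD (PySem.List.pyGetD data y []) x none   -- data[y][x]; default unreachable under Pre_
    if found.contains v ∧ v ≠ none then false
    else pvA_colLoop data x ys (found ++ [v])

-- outer loop 'for x in range(0, len(data[0]))'
def pvA_outer (data : List (List (Option Int))) : List Int → Bool
  | [] => true
  | x :: xs =>
    if pvA_colLoop data x (PySem.List.pyRange 0 (PySem.List.len data) 1) [] then pvA_outer data xs
    else false

def checkColumnsPossible (data : List (List (Option Int))) : Bool :=
  pvA_outer data (PySem.List.pyRange 0 (PySem.List.len (PySem.List.pyGetD data 0 [])) 1)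

-- ===== PORT B =====
-- vals = [row[x] for row in data if row[x] is not None]
def pvB_colVals (data : List (List (Option Int))) (x : Int) : List Int :=
  data.filterMap (fun row => PySem.List.pyGetD row x none)

def pvB_outer (data : List (List (Option Int))) : List Int → Bool
  | [] => true
  | x :: xs =>
    let vals := pvB_colVals data x
    if PySem.List.len vals ≠ PySem.Set.len (PySem.Set.ofList vals) then false
    else pvB_outer data xs

def checkColumnsPossible_alt (data : List (List (Option Int))) : Bool :=
  pvB_outer data (PySem.List.pyRange 0 (PySem.List.len (PySem.List.pyGetD data 0 [])) 1)

-- ===== PRECONDITION & SPEC =====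
-- Pre_ excludes empty data (len(data[0]) raises IndexError) and ragged grids with a row shorter than
-- row 0: there A raises IndexError unless an earlier duplicate happens to short-circuit with False
-- (an accident of its scan order), and B's column comprehension raises IndexError as well.
def Pre_checkColumnsPossible (data : List (List (Option Int))) : Prop :=
  data ≠ [] ∧ ∀ row ∈ data, (data.headD []).length ≤ row.length
instance (data : List (List (Option Int))) : Decidable (Pre_checkColumnsPossible data) := by
  unfold Pre_checkColumnsPossible; infer_instance

def pvWitness_checkColumnsPossible : List (List (Option Int)) :=
  [[some 1, none], [none, some 1]]

def Spec_checkColumnsPossible (data : List (List (Option Int))) (out : Bool) : Prop := out = checkColumnsPossible_alt data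
instance (data : List (List (Option Int))) (out : Bool) : Decidable (Spec_checkColumnsPossible data out) := by unfold Spec_checkColumnsPossible; infer_instance

-- ===== CLAIM (what is proved, stated in full; the proofs are below) =====
def Claim_equal_checkColumnsPossible : Prop := ∀ (data : List (List (Option Int))), Dom_checkColumnsPossible data → Pre_checkColumnsPossible data → Spec_checkColumnsPossible data (checkColumnsPossible data)

-- ===== LEMMAS AND PROOFS =====

-- A's inner scan succeeds iff the column's non-None values are pairwise distinct and none of them is in found
lemma pvA_colLoop_true_iff (data : List (List (Option Int))) (x : Int) :
    ∀ (ys : List Int) (found : List (Option Int)),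
      pvA_colLoop data x ys found = true ↔
        ((ys.map (fun y => PySem.List.pyGetD (PySem.List.pyGetD data y []) x none)).filterMap id).Nodup ∧
        ∀ a ∈ (ys.map (fun y => PySem.List.pyGetD (PySem.List.pyGetD data y []) x none)).filterMap id,
          (some a) ∉ found := by
  intro ys
  induction ys with
  | nil => intro found; simp [pvA_colLoop]
  | cons y ys ih =>
    intro found
    rcases hveq : PySem.List.pyGetD (PySem.List.pyGetD data y []) x none with _ | b
    · simp only [pvA_colLoop, hveq, List.map_cons, List.filterMap_cons, id_eq]
      rw [if_neg (by simp), ih]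
      constructor
      · rintro ⟨h1, h2⟩
        refine ⟨h1, fun a ha => ?_⟩
        have := h2 a ha
        simp only [List.mem_append, List.mem_singleton] at this
        tauto
      · rintro ⟨h1, h2⟩
        refine ⟨h1, fun a ha => ?_⟩
        simp only [List.mem_append, List.mem_singleton]
        rintro (hf | hf)
        · exact h2 a ha hf
        · simp at hf
    · simp only [pvA_colLoop, hveq, List.map_cons, List.filterMap_cons, id_eq]
      by_cases hc : (some b) ∈ found
      · rw [if_pos ⟨(PySem.Set.contains_iff found (some b)).mpr hc, by simp⟩]
        simp only [Bool.false_eq_true, false_iff]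
        rintro ⟨-, h2⟩
        exact h2 b (by simp) hc
      · rw [if_neg (by
          rintro ⟨hcon, -⟩
          exact hc ((PySem.Set.contains_iff found (some b)).mp hcon)), ih]
        simp only [List.nodup_cons, List.mem_cons, List.mem_append, Option.some.injEq]
        constructor
        · rintro ⟨h1, h2⟩
          refine ⟨⟨fun hb => (by have := h2 b hb; tauto), h1⟩, ?_⟩
          rintro a (rfl | ha)
          · exact hc
          · have := h2 a ha; tauto
        · rintro ⟨⟨hb, h1⟩, h2⟩
          refine ⟨h1, fun a ha => ?_⟩
          have hne : a ≠ b := fun h => hb (h ▸ ha)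
          have := h2 a (Or.inr ha)
          tauto

-- set(vals) has the same size as vals exactly when vals has no duplicates
lemma len_ofList_eq_iff (xs : List Int) :
    (PySem.Set.ofList xs).length = xs.length ↔ xs.Nodup := by
  induction xs using List.reverseRecOn with
  | nil => simp [PySem.Set.ofList_nil]
  | append_singleton xs x ih =>
    rw [PySem.Set.ofList_append_singleton, PySem.Set.add]
    by_cases hx : x ∈ xs
    · have hc : PySem.Set.contains (PySem.Set.ofList xs) x = true :=
        (PySem.Set.contains_iff _ _).mpr (by simp [PySem.Set.mem_ofList, hx])
      rw [if_pos hc]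
      have hle := PySem.Set.length_ofList_le xs
      rw [List.length_append, List.length_singleton]
      constructor
      · intro h; exact absurd h (by omega)
      · intro h; exact ((List.nodup_append.mp h).2.2 x hx x (by simp) rfl).elim
    · have hc : PySem.Set.contains (PySem.Set.ofList xs) x = false := by
        rw [Bool.eq_false_iff]
        intro hcc
        exact hx (by simpa [PySem.Set.mem_ofList] using (PySem.Set.contains_iff _ _).mp hcc)
      rw [if_neg (fun hcc => by rw [hc] at hcc; exact Bool.false_ne_true hcc)]
      rw [List.length_append, List.length_append, List.length_singleton, List.nodup_append]
      constructor
      · intro h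
        refine ⟨ih.mp (by omega), List.nodup_singleton x, ?_⟩
        intro a ha b hb
        simp only [List.mem_singleton] at hb
        exact fun hab => hx ((hb ▸ hab) ▸ ha)
      · rintro ⟨h1, -, -⟩
        rw [ih.mpr h1]

-- B's per-column test, unfolded to Nodup
lemma pvB_cond_iff (data : List (List (Option Int))) (x : Int) :
    (PySem.List.len (pvB_colVals data x) ≠ PySem.Set.len (PySem.Set.ofList (pvB_colVals data x)))
      ↔ ¬ (pvB_colVals data x).Nodup := by
  rw [not_iff_not]
  simp only [PySem.Set.len, PySem.List.len_eq]
  rw [← len_ofList_eq_iff]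
  constructor
  · intro h; exact_mod_cast h.symm
  · intro h; exact_mod_cast h.symm

-- the column A scans is exactly B's vals list
lemma colvals_eq (data : List (List (Option Int))) (x : Int) :
    ((PySem.List.pyRange 0 (PySem.List.len data) 1).map
        (fun y => PySem.List.pyGetD (PySem.List.pyGetD data y []) x none)).filterMap id
      = pvB_colVals data x := by
  have h1 : (PySem.List.pyRange 0 (PySem.List.len data) 1).map
      (fun y => PySem.List.pyGetD (PySem.List.pyGetD data y []) x none)
      = ((PySem.List.pyRange 0 (PySem.List.len data) 1).map
          (fun y => PySem.List.pyGetD data y [])).map (fun row => PySem.List.pyGetD row x none) := by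
    rw [List.map_map]
    rfl
  rw [h1, PySem.List.map_pyGetD_pyRange_zero data []]
  rw [List.filterMap_map]
  rfl

lemma outer_eq (data : List (List (Option Int))) :
    ∀ xs : List Int, pvA_outer data xs = pvB_outer data xs := by
  intro xs
  induction xs with
  | nil => rfl
  | cons x xs ih =>
    simp only [pvA_outer, pvB_outer]
    have hcol : pvA_colLoop data x (PySem.List.pyRange 0 (PySem.List.len data) 1) [] = true
        ↔ (pvB_colVals data x).Nodup := by
      rw [pvA_colLoop_true_iff, colvals_eq]
      simp
    by_cases hnd : (pvB_colVals data x).Nodup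
    · rw [if_pos (hcol.mpr hnd), if_neg (by rw [pvB_cond_iff data x]; exact not_not.mpr hnd), ih]
    · rw [if_neg (fun h => hnd (hcol.mp h)), if_pos ((pvB_cond_iff data x).mpr hnd)]

-- ===== VERDICT (by name: the statement is the Claim_ definition above) =====
theorem checkColumnsPossible_spec : Claim_equal_checkColumnsPossible := by
  intro data _ _
  unfold Spec_checkColumnsPossible checkColumnsPossible checkColumnsPossible_alt
  exact outer_eq data _
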